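-- pv_equiv track=rewrite | github.com/neoforge-dev/synapse | techlead-autopilot/src/techlead_autopilot/core/lead_detection/lead_detector.py | _detect_company_size
-- ===== SOURCE A (Python) =====
-- from typing import Dict, List, Optional, Tuple
--
-- def _detect_company_size(content: str, author_info: Dict) -> str:
--     """Detect company size from content and author information."""
--     content_lower = content.lower()
--
--     # Check author info first (LinkedIn title, company)
--     title = author_info.get('title', '').lower()
--     company = author_info.get('company', '').lower()
--
--     if any(term in title + company for term in ['cto', 'vp engineering', 'head of engineering']):
--         if any(term in content_lower for term in ['series c', 'series d', 'public', 'enterprise', 'fortune']):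
--             return "Enterprise (500+ employees)"
--         elif any(term in content_lower for term in ['series b', 'scale up', '100', '200']):
--             return "Growth Stage (50-500 employees)"
--         elif any(term in content_lower for term in ['series a', 'startup', 'early stage']):
--             return "Early Stage (10-50 employees)"
--
--     # Fallback to content analysis
--     if any(term in content_lower for term in ['enterprise', 'fortune 500', 'large company']):
--         return "Enterprise (500+ employees)"
--     elif any(term in content_lower for term in ['startup', 'early stage', 'founding team']):
--         return "Startup (1-20 employees)"
--     else:
--         return "Unknown"
-- ===== SOURCE B (Python) =====
-- def _detect_company_size(content: str, author_info) -> str: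
--     """Detect company size from content and author information."""
--     content_lower = content.lower()
--     text = (author_info.get('title', '') + author_info.get('company', '')).lower()
--     senior = any(t in text for t in ('cto', 'vp engineering', 'head of engineering'))
--
--     # Flat keyword index: each keyword carries the tier it votes for.
--     # Tiers 0-2 are only active for senior authors; 3-4 are content fallbacks.
--     KEYWORDS = [
--         ('series c', 0), ('series d', 0), ('public', 0), ('enterprise', 0), ('fortune', 0),
--         ('series b', 1), ('scale up', 1), ('100', 1), ('200', 1),
--         ('series a', 2), ('startup', 2), ('early stage', 2),
--         ('enterprise', 3), ('fortune 500', 3), ('large company', 3),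
--         ('startup', 4), ('early stage', 4), ('founding team', 4),
--     ]
--     LABELS = [
--         "Enterprise (500+ employees)",
--         "Growth Stage (50-500 employees)",
--         "Early Stage (10-50 employees)",
--         "Enterprise (500+ employees)",
--         "Startup (1-20 employees)",
--     ]
--
--     # Single pass over the keyword index, keeping the best (minimum) tier hit.
--     best = None
--     for term, tier in KEYWORDS:
--         if (senior or tier >= 3) and term in content_lower:
--             if best is None or tier < best:
--                 best = tier
--     return LABELS[best] if best is not None else "Unknown"
-- ===== Notes on version B (the rewrite author's own statement) =====
-- stated objective: alternative
-- what changed: Replaced the nested if/elif branch logic with a flat keyword-to-tier index scanned in a single pass that keeps the minimum (best-priority) tier among all matching keywords, with the seniority gate expressed as a per-entry activation condition (tier >= 3 entries are ungated) and the label recovered by indexing a tier-to-label table.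
import Mathlib
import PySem

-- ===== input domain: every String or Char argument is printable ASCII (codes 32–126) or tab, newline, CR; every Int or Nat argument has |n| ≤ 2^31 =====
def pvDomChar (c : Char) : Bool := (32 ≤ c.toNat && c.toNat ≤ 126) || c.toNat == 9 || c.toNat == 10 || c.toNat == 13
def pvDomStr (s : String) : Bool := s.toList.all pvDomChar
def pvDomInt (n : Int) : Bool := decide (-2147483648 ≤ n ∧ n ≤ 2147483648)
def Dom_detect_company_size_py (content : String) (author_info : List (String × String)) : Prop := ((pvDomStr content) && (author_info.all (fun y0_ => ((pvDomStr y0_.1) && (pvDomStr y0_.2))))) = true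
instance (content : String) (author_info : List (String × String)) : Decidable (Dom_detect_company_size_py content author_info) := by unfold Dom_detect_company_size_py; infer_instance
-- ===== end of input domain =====

-- B replaces A's nested if/elif branch logic with a flat keyword→tier index scanned
-- in one pass keeping the minimum tier hit; alternative decomposition, same cost.


-- ===== PORT A =====
def detect_company_size_py (content : String) (author_info : List (String × String)) : String :=
  let content_lower := PySem.Chars.lower content.toList
  -- author_info.get('title', '').lower() / author_info.get('company', '').lower()
  let title := PySem.Chars.lower ((author_info.lookup "title").getD "").toList
  let company := PySem.Chars.lower ((author_info.lookup "company").getD "").toList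
  -- fallback: the straight-line code after the senior if-block
  let fallback :=
    if ["enterprise", "fortune 500", "large company"].any
        (fun t => PySem.Chars.isIn t.toList content_lower) then
      "Enterprise (500+ employees)"
    else if ["startup", "early stage", "founding team"].any
        (fun t => PySem.Chars.isIn t.toList content_lower) then
      "Startup (1-20 employees)"
    else
      "Unknown"
  if ["cto", "vp engineering", "head of engineering"].any
      (fun t => PySem.Chars.isIn t.toList (title ++ company)) then
    if ["series c", "series d", "public", "enterprise", "fortune"].any
        (fun t => PySem.Chars.isIn t.toList content_lower) then
      "Enterprise (500+ employees)"
    else if ["series b", "scale up", "100", "200"].any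
        (fun t => PySem.Chars.isIn t.toList content_lower) then
      "Growth Stage (50-500 employees)"
    else if ["series a", "startup", "early stage"].any
        (fun t => PySem.Chars.isIn t.toList content_lower) then
      "Early Stage (10-50 employees)"
    else fallback
  else fallback

-- ===== PORT B =====
-- flat keyword index: each keyword votes for a tier; tiers 0-2 are senior-gated
def pvKeywords : List (String × Nat) :=
  [("series c", 0), ("series d", 0), ("public", 0), ("enterprise", 0), ("fortune", 0),
   ("series b", 1), ("scale up", 1), ("100", 1), ("200", 1),
   ("series a", 2), ("startup", 2), ("early stage", 2),
   ("enterprise", 3), ("fortune 500", 3), ("large company", 3),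
   ("startup", 4), ("early stage", 4), ("founding team", 4)]

def pvLabels : List String :=
  ["Enterprise (500+ employees)",
   "Growth Stage (50-500 employees)",
   "Early Stage (10-50 employees)",
   "Enterprise (500+ employees)",
   "Startup (1-20 employees)"]

def detect_company_size_py_alt (content : String) (author_info : List (String × String)) : String :=
  let content_lower := PySem.Chars.lower content.toList
  -- (author_info.get('title','') + author_info.get('company','')).lower()
  let text := PySem.Chars.lower
    (((author_info.lookup "title").getD "").toList ++ ((author_info.lookup "company").getD "").toList)
  let senior := ["cto", "vp engineering", "head of engineering"].any
    (fun t => PySem.Chars.isIn t.toList text)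
  -- single pass: keep the best (minimum) tier among matching keywords
  let best := pvKeywords.foldl
    (fun best e =>
      if (senior || decide (3 ≤ e.2)) && PySem.Chars.isIn e.1.toList content_lower then
        match best with
        | none => some e.2
        | some b => if e.2 < b then some e.2 else some b
      else best)
    (none : Option Nat)
  -- LABELS[best]: best ∈ {0..4}, always in range of the 5-element list, so getD is exact
  match best with
  | some b => pvLabels.getD b "Unknown"
  | none => "Unknown"

-- ===== PRECONDITION & SPEC =====
def Spec_detect_company_size_py (content : String) (author_info : List (String × String)) (out : String) : Prop := out = detect_company_size_py_alt content author_info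
instance (content : String) (author_info : List (String × String)) (out : String) : Decidable (Spec_detect_company_size_py content author_info out) := by unfold Spec_detect_company_size_py; infer_instance

-- ===== CLAIM (what is proved, stated in full; the proofs are below) =====
def Claim_equal_detect_company_size_py : Prop := ∀ (content : String) (author_info : List (String × String)), Dom_detect_company_size_py content author_info → Spec_detect_company_size_py content author_info (detect_company_size_py content author_info)

-- ===== LEMMAS AND PROOFS =====
theorem lower_append (a b : List Char) :
    PySem.Chars.lower (a ++ b) = PySem.Chars.lower a ++ PySem.Chars.lower b := by
  simp [PySem.Chars.lower]

-- one constant-tier keyword group folds to a single min-update gated by its `any`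
theorem grp_fold (hay : List Char) (g : Bool) (t : Nat) (names : List String) (acc : Option Nat) :
    (names.map (fun n => (n, t))).foldl
      (fun best e =>
        if (g || decide (3 ≤ e.2)) && PySem.Chars.isIn e.1.toList hay then
          match best with
          | none => some e.2
          | some b => if e.2 < b then some e.2 else some b
        else best) acc
    = if (g || decide (3 ≤ t)) && names.any (fun n => PySem.Chars.isIn n.toList hay) then
        (match acc with
         | none => some t
         | some b => if t < b then some t else some b)
      else acc := by
  induction names generalizing acc with
  | nil => simp
  | cons n ns ih =>
    simp only [List.map_cons, List.foldl_cons, List.any_cons, ih]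
    cases hG : (g || decide (3 ≤ t))
    · simp
    · by_cases hN : PySem.Chars.isIn n.toList hay = true
      · simp only [hN, Bool.true_and, Bool.true_or, if_true]
        by_cases ha : ns.any (fun n => PySem.Chars.isIn n.toList hay) = true
        · simp only [ha, if_true]
          rcases acc with _ | b <;> simp <;> split_ifs <;> simp_all
        · simp [ha]
      · rw [Bool.not_eq_true] at hN
        simp [hN]

theorem pvKeywords_groups : pvKeywords =
    (["series c", "series d", "public", "enterprise", "fortune"].map (fun n => (n, 0)))
    ++ (["series b", "scale up", "100", "200"].map (fun n => (n, 1)))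
    ++ (["series a", "startup", "early stage"].map (fun n => (n, 2)))
    ++ (["enterprise", "fortune 500", "large company"].map (fun n => (n, 3)))
    ++ (["startup", "early stage", "founding team"].map (fun n => (n, 4))) := rfl

-- ===== VERDICT (by name: the statement is the Claim_ definition above) =====
theorem detect_company_size_py_spec : Claim_equal_detect_company_size_py := by
  intro content author_info _
  unfold Spec_detect_company_size_py
  simp only [detect_company_size_py, detect_company_size_py_alt, lower_append,
    pvKeywords_groups, List.foldl_append, grp_fold, List.any,
    show decide (3 ≤ (0:Nat)) = false from rfl, show decide (3 ≤ (1:Nat)) = false from rfl,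
    show decide (3 ≤ (2:Nat)) = false from rfl, show decide (3 ≤ (3:Nat)) = true from rfl,
    show decide (3 ≤ (4:Nat)) = true from rfl,
    Bool.or_false, Bool.or_true, Bool.true_and]
  generalize (PySem.Chars.isIn "cto".toList
        (PySem.Chars.lower ((List.lookup "title" author_info).getD "").toList ++
          PySem.Chars.lower ((List.lookup "company" author_info).getD "").toList) ||
      (PySem.Chars.isIn "vp engineering".toList
          (PySem.Chars.lower ((List.lookup "title" author_info).getD "").toList ++
            PySem.Chars.lower ((List.lookup "company" author_info).getD "").toList) ||
        PySem.Chars.isIn "head of engineering".toList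
          (PySem.Chars.lower ((List.lookup "title" author_info).getD "").toList ++
            PySem.Chars.lower ((List.lookup "company" author_info).getD "").toList))) = s
  generalize (PySem.Chars.isIn "series c".toList (PySem.Chars.lower content.toList) ||
      (PySem.Chars.isIn "series d".toList (PySem.Chars.lower content.toList) ||
        (PySem.Chars.isIn "public".toList (PySem.Chars.lower content.toList) ||
          (PySem.Chars.isIn "enterprise".toList (PySem.Chars.lower content.toList) ||
            PySem.Chars.isIn "fortune".toList (PySem.Chars.lower content.toList))))) = e1
  generalize (PySem.Chars.isIn "series b".toList (PySem.Chars.lower content.toList) ||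
      (PySem.Chars.isIn "scale up".toList (PySem.Chars.lower content.toList) ||
        (PySem.Chars.isIn "100".toList (PySem.Chars.lower content.toList) ||
          PySem.Chars.isIn "200".toList (PySem.Chars.lower content.toList)))) = gr
  generalize (PySem.Chars.isIn "series a".toList (PySem.Chars.lower content.toList) ||
      (PySem.Chars.isIn "startup".toList (PySem.Chars.lower content.toList) ||
        PySem.Chars.isIn "early stage".toList (PySem.Chars.lower content.toList))) = ea
  generalize (PySem.Chars.isIn "enterprise".toList (PySem.Chars.lower content.toList) ||
      (PySem.Chars.isIn "fortune 500".toList (PySem.Chars.lower content.toList) ||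
        PySem.Chars.isIn "large company".toList (PySem.Chars.lower content.toList))) = fe
  generalize (PySem.Chars.isIn "startup".toList (PySem.Chars.lower content.toList) ||
      (PySem.Chars.isIn "early stage".toList (PySem.Chars.lower content.toList) ||
        PySem.Chars.isIn "founding team".toList (PySem.Chars.lower content.toList))) = fs
  revert s e1 gr ea fe fs
  decide
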